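-- pv_equiv track=rewrite | github.com/ronney19/liveweb-arena | scripts/generate_training_dataset.py | _tags_finalized_at_url_index
-- ===== SOURCE A (Python) =====
-- from typing import Any, Dict, List, Optional
--
-- def _tags_finalized_at_url_index(
--     required_urls: List[str],
--     answer_tags_per_url: Dict[str, List[str]],
-- ) -> Dict[int, List[str]]:
--     """
--     For each step index, which answer tags are "settled" on that page (last required
--     visit that lists the tag in answer_tags_per_url).
--     """
--     tag_to_last_idx: Dict[str, int] = {}
--     for i, u in enumerate(required_urls):
--         for tag in answer_tags_per_url.get(u, []):
--             tag_to_last_idx[tag] = max(tag_to_last_idx.get(tag, -1), i)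
--     index_to_tags: Dict[int, List[str]] = {}
--     for tag, idx in tag_to_last_idx.items():
--         index_to_tags.setdefault(idx, []).append(tag)
--     for idx in index_to_tags:
--         index_to_tags[idx] = sorted(set(index_to_tags[idx]))
--     return index_to_tags
-- ===== SOURCE B (Python) =====
-- from typing import Dict, List
--
--
-- def _tags_finalized_at_url_index(
--     required_urls: List[str],
--     answer_tags_per_url: Dict[str, List[str]],
-- ) -> Dict[int, List[str]]:
--     # Tags in order of first appearance across the required visits.
--     tags_in_order: List[str] = []
--     for u in required_urls:
--         for tag in answer_tags_per_url.get(u, []):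
--             if tag not in tags_in_order:
--                 tags_in_order.append(tag)
--
--     def last_idx(tag: str) -> int:
--         # Last required visit whose page lists the tag (search from the end).
--         for i, u in reversed(list(enumerate(required_urls))):
--             if tag in answer_tags_per_url.get(u, []):
--                 return i
--         return -1  # unreachable: every collected tag occurs somewhere
--
--     pairs = [(last_idx(t), t) for t in tags_in_order]
--     result: Dict[int, List[str]] = {}
--     for idx, _tag in pairs:
--         if idx not in result:
--             result[idx] = sorted({t for j, t in pairs if j == idx})
--     return result
-- ===== Notes on version B (the rewrite author's own statement) =====
-- stated objective: alternative
-- what changed: Replaces the forward max-accumulator dict (tag -> running last index) and the setdefault/append grouping pass by: collect tags in first-occurrence order, find each tag's last settled index by a first-match search from the end, and build each index's bucket directly as sorted({tags with that last index}) via a comprehension at the first pair carrying that index.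
import Mathlib
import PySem

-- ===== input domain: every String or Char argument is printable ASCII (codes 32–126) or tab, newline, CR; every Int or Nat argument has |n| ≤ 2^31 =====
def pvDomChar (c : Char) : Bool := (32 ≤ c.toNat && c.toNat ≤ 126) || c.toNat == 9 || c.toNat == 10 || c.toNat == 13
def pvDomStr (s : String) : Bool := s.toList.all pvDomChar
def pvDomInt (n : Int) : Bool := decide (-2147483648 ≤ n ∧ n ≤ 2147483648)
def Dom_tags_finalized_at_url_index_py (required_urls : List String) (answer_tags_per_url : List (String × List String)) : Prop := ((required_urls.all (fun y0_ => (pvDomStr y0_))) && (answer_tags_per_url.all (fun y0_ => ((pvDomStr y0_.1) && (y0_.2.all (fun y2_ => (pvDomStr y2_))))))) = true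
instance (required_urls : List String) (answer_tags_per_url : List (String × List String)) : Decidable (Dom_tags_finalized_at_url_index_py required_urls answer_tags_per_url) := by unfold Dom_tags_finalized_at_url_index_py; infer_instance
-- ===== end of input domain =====

-- B replaces A's forward max-accumulator dict and setdefault/append grouping by a first-occurrence
-- tag list, a last-match search from the end per tag, and direct per-index bucket construction
-- (alternative decomposition, similar cost).


-- ===== PORT A =====
def tags_finalized_at_url_index_py (required_urls : List String) (answer_tags_per_url : List (String × List String)) : List (Int × List String) :=
  let d := PySem.Dict.ofList answer_tags_per_url
  let tag_to_last_idx : PySem.Dict String Int :=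
    (PySem.List.enumerate required_urls 0).foldl
      (fun t2l p =>
        (d.getD p.2 []).foldl (fun t2l tag => t2l.insert tag (max (t2l.getD tag (-1)) p.1)) t2l)
      PySem.Dict.empty
  let index_to_tags : PySem.Dict Int (List String) :=
    tag_to_last_idx.items.foldl
      (fun g q => g.modify q.2 [] (fun l => l ++ [q.1])) PySem.Dict.empty
  let final : PySem.Dict Int (List String) :=
    index_to_tags.keys.foldl
      (fun g idx => g.insert idx (PySem.List.sorted (PySem.Set.ofList (g.getD idx [])) (fun x => x) false))
      index_to_tags
  final.items

-- ===== PORT B =====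
def tags_finalized_at_url_index_py_alt (required_urls : List String) (answer_tags_per_url : List (String × List String)) : List (Int × List String) :=
  let d := PySem.Dict.ofList answer_tags_per_url
  let tags_in_order : List String :=
    required_urls.foldl
      (fun acc u => (d.getD u []).foldl (fun acc tag => if tag ∈ acc then acc else acc ++ [tag]) acc) []
  let last_idx : String → Int := fun tag =>
    match (PySem.List.enumerate required_urls 0).reverse.find? (fun p => (d.getD p.2 []).contains tag) with
    | some p => p.1
    | none => -1
  let pairs : List (Int × String) := tags_in_order.map (fun t => (last_idx t, t))
  let result : PySem.Dict Int (List String) :=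
    pairs.foldl
      (fun g q =>
        if g.contains q.1 then g
        else g.insert q.1
          (PySem.List.sorted (PySem.Set.ofList ((pairs.filter (fun r => r.1 == q.1)).map (·.2))) (fun x => x) false))
      PySem.Dict.empty
  result.items

-- ===== PRECONDITION & SPEC =====
def Spec_tags_finalized_at_url_index_py (required_urls : List String) (answer_tags_per_url : List (String × List String)) (out : List (Int × List String)) : Prop := out = tags_finalized_at_url_index_py_alt required_urls answer_tags_per_url
instance (required_urls : List String) (answer_tags_per_url : List (String × List String)) (out : List (Int × List String)) : Decidable (Spec_tags_finalized_at_url_index_py required_urls answer_tags_per_url out) := by unfold Spec_tags_finalized_at_url_index_py; infer_instance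

-- ===== CLAIM (what is proved, stated in full; the proofs are below) =====
def Claim_equal_tags_finalized_at_url_index_py : Prop := ∀ (required_urls : List String) (answer_tags_per_url : List (String × List String)), Dom_tags_finalized_at_url_index_py required_urls answer_tags_per_url → Spec_tags_finalized_at_url_index_py required_urls answer_tags_per_url (tags_finalized_at_url_index_py required_urls answer_tags_per_url)

-- ===== LEMMAS AND PROOFS =====

-- abbreviation used only by the proofs: A's running last-index accumulator
def pvL (tg : String → List String) (e : List (Int × String)) (t : String) : Int :=
  e.foldl (fun m p => if t ∈ tg p.2 then max m p.1 else m) (-1)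

-- A's inner loop over one page's tag list, seen through getD.
theorem pv_innerMax (t : String) (ts : List String) (d : PySem.Dict String Int) (i : Int) :
    ((ts.foldl (fun t2l tag => t2l.insert tag (max (t2l.getD tag (-1)) i)) d).getD t (-1))
      = if t ∈ ts then max (d.getD t (-1)) i else d.getD t (-1) := by
  induction ts generalizing d with
  | nil => simp
  | cons a ts ih =>
    simp only [List.foldl_cons]
    rw [ih]
    by_cases hat : t = a
    · subst hat
      by_cases hts : t ∈ ts <;>
        simp only [hts, List.mem_cons, true_or, or_true, if_pos,
          PySem.Dict.getD_insert] <;> simp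
    · by_cases hts : t ∈ ts <;>
        simp [hts, PySem.Dict.getD_insert, hat]

-- A's double loop, seen through getD: a running max over the visits containing t.
theorem pv_outerMax (tg : String → List String) (t : String) (e : List (Int × String))
    (d : PySem.Dict String Int) :
    ((e.foldl (fun t2l p =>
        (tg p.2).foldl (fun t2l tag => t2l.insert tag (max (t2l.getD tag (-1)) p.1)) t2l) d).getD t (-1))
      = e.foldl (fun m p => if t ∈ tg p.2 then max m p.1 else m) (d.getD t (-1)) := by
  induction e generalizing d with
  | nil => simp
  | cons p e ih =>
    simp only [List.foldl_cons]
    rw [ih, pv_innerMax]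

-- A's double loop: keys are all tags seen, in first-occurrence order.
theorem pv_outerKeys (tg : String → List String) (e : List (Int × String))
    (d : PySem.Dict String Int) :
    ((e.foldl (fun t2l p =>
        (tg p.2).foldl (fun t2l tag => t2l.insert tag (max (t2l.getD tag (-1)) p.1)) t2l) d).keys)
      = PySem.Set.update d.keys (e.flatMap (fun p => tg p.2)) := by
  induction e generalizing d with
  | nil => simp [PySem.Set.update_nil]
  | cons p e ih =>
    simp only [List.foldl_cons, List.flatMap_cons]
    rw [ih, PySem.Dict.keys_foldl_insert, PySem.Set.update_append]

-- the running max stays below any common bound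
theorem pv_maxFoldLe (pred : Int × String → Bool) (b : Int) (e : List (Int × String)) (m : Int)
    (hm : m ≤ b) (hb : ∀ p ∈ e, p.1 ≤ b) :
    e.foldl (fun m p => if pred p then max m p.1 else m) m ≤ b := by
  induction e generalizing m with
  | nil => simpa
  | cons p e ih =>
    simp only [List.foldl_cons]
    apply ih
    · have h1 := hb p (by simp)
      by_cases hp : pred p <;> simp [hp] <;> omega
    · intro q hq; exact hb q (by simp [hq])

-- first match from the end = running max, when first components strictly increase and are ≥ -1
theorem pv_findRev (pred : Int × String → Bool) (e : List (Int × String))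
    (hmono : e.Pairwise (fun p q => p.1 < q.1)) (hge : ∀ p ∈ e, -1 ≤ p.1) :
    (match e.reverse.find? pred with | some p => p.1 | none => -1)
      = e.foldl (fun m p => if pred p then max m p.1 else m) (-1) := by
  induction e using List.reverseRecOn with
  | nil => simp
  | append_singleton xs x ih =>
    have hsplit := List.pairwise_append.mp hmono
    have hx : ∀ p ∈ xs, p.1 < x.1 := fun p hp => hsplit.2.2 p hp x (by simp)
    rw [List.foldl_append]
    simp only [List.reverse_append, List.reverse_singleton, List.singleton_append,
      List.foldl_cons, List.foldl_nil]
    by_cases hp : pred x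
    · rw [List.find?_cons_of_pos hp]
      have hxge : (-1 : Int) ≤ x.1 := hge x (by simp)
      have hfle : xs.foldl (fun m p => if pred p then max m p.1 else m) (-1) ≤ x.1 :=
        pv_maxFoldLe pred x.1 xs (-1) hxge (fun p hp' => le_of_lt (hx p hp'))
      simp only [hp, if_true]
      show x.1 = max (xs.foldl (fun m p => if pred p then max m p.1 else m) (-1)) x.1
      omega
    · rw [List.find?_cons_of_neg hp]
      simp only [hp, Bool.false_eq_true, if_false]
      exact ih hsplit.1 (fun p hp' => hge p (by simp [hp']))

-- B's membership-append loop is set update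
theorem pv_addFold (ts : List String) (acc : List String) :
    ts.foldl (fun acc tag => if tag ∈ acc then acc else acc ++ [tag]) acc
      = PySem.Set.update acc ts := by
  induction ts generalizing acc with
  | nil => simp [PySem.Set.update_nil]
  | cons a ts ih =>
    rw [List.foldl_cons, ih, PySem.Set.update_cons]
    congr 1
    by_cases h : a ∈ acc
    · simp [PySem.Set.add_of_mem, h]
    · simp [PySem.Set.add_of_not_mem, h]

-- A's sorting pass over the group dict, seen through getD
theorem pv_sortLoopGetD (ks : List Int)
    (g : PySem.Dict Int (List String)) (hnd : ks.Nodup) (k : Int) :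
    ((ks.foldl (fun d k' => d.insert k'
        (PySem.List.sorted (PySem.Set.ofList (d.getD k' [])) (fun x => x) false)) g).getD k [])
      = if k ∈ ks then PySem.List.sorted (PySem.Set.ofList (g.getD k [])) (fun x => x) false
        else g.getD k [] := by
  induction ks generalizing g with
  | nil => simp
  | cons k' ks ih =>
    obtain ⟨hk', hnd'⟩ := List.nodup_cons.mp hnd
    rw [List.foldl_cons, ih _ hnd']
    by_cases hk : k = k'
    · subst hk
      have : k ∉ ks := hk'
      simp [this]
    · by_cases hmem : k ∈ ks <;> simp [hmem, hk, PySem.Dict.getD_insert]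

-- B's insert-if-new grouping loop: keys
theorem pv_groupKeys (ps0 : List (Int × String)) (ps : List (Int × String))
    (d : PySem.Dict Int (List String)) :
    ((ps.foldl (fun g q => if g.contains q.1 then g else g.insert q.1
        (PySem.List.sorted (PySem.Set.ofList ((ps0.filter (fun r => r.1 == q.1)).map (·.2))) (fun x => x) false)) d).keys)
      = PySem.Set.update d.keys (ps.map (·.1)) := by
  induction ps generalizing d with
  | nil => simp [PySem.Set.update_nil]
  | cons q ps ih =>
    rw [List.map_cons, PySem.Set.update_cons, List.foldl_cons]
    by_cases h : d.contains q.1 = true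
    · rw [if_pos h, ih]
      have hm : q.1 ∈ d.keys := (PySem.Dict.contains_iff_mem_keys _ _).mp h
      rw [PySem.Set.add_of_mem hm]
    · rw [if_neg h, ih]
      have hnm : q.1 ∉ d.keys := fun hm => h ((PySem.Dict.contains_iff_mem_keys _ _).mpr hm)
      rw [PySem.Dict.keys_insert_of_not_contains _ _ (by simpa using h),
        PySem.Set.add_of_not_mem hnm]

-- B's insert-if-new grouping loop: lookups
theorem pv_groupGetD (ps0 : List (Int × String)) (ps : List (Int × String))
    (d : PySem.Dict Int (List String)) (k : Int) :
    ((ps.foldl (fun g q => if g.contains q.1 then g else g.insert q.1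
        (PySem.List.sorted (PySem.Set.ofList ((ps0.filter (fun r => r.1 == q.1)).map (·.2))) (fun x => x) false)) d).getD k [])
      = if d.contains k then d.getD k []
        else if k ∈ ps.map (·.1)
          then PySem.List.sorted (PySem.Set.ofList ((ps0.filter (fun r => r.1 == k)).map (·.2))) (fun x => x) false
          else [] := by
  induction ps generalizing d with
  | nil =>
    by_cases h : d.contains k = true
    · simp [h]
    · simp [h, PySem.Dict.getD_of_not_contains _ _ (by simpa using h)]
  | cons q ps ih =>
    rw [List.foldl_cons, List.map_cons]
    by_cases h : d.contains q.1 = true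
    · rw [if_pos h, ih]
      by_cases hdk : d.contains k = true
      · rw [if_pos hdk, if_pos hdk]
      · have hne : k ≠ q.1 := fun he => hdk (he ▸ h)
        rw [if_neg hdk, if_neg hdk]
        by_cases hmem : k ∈ ps.map (fun x => x.1)
        · rw [if_pos hmem, if_pos (List.mem_cons_of_mem _ hmem)]
        · rw [if_neg hmem, if_neg (by simp [hne, hmem])]
    · rw [if_neg h, ih]
      by_cases hk : k = q.1
      · subst hk
        simp [h]
      · have hkb : (k == q.1) = false := by simp [hk]
        simp only [PySem.Dict.contains_insert, PySem.Dict.getD_insert, hkb, Bool.false_or,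
          if_neg hk]
        by_cases hdk : d.contains k = true
        · rw [if_pos hdk, if_pos hdk]
        · rw [if_neg hdk, if_neg hdk]
          by_cases hmem : k ∈ ps.map (fun x => x.1)
          · rw [if_pos hmem, if_pos (List.mem_cons_of_mem _ hmem)]
          · rw [if_neg hmem, if_neg (by simp [hk, hmem])]

-- updating a set with elements it already has changes nothing
theorem pv_update_of_subset (s : List Int) (xs : List Int) (h : ∀ x ∈ xs, x ∈ s) :
    PySem.Set.update s xs = s := by
  induction xs with
  | nil => simp [PySem.Set.update_nil]
  | cons a xs ih =>
    rw [PySem.Set.update_cons, PySem.Set.add_of_mem (h a (by simp))]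
    exact ih (fun x hx => h x (by simp [hx]))

-- the whole pipeline, for an arbitrary lookup function tg
theorem pv_main (urls : List String) (tg : String → List String) :
    ((((((PySem.List.enumerate urls 0).foldl (fun t2l p => (tg p.2).foldl (fun t2l tag => t2l.insert tag (max (t2l.getD tag (-1)) p.1)) t2l) PySem.Dict.empty).items.foldl (fun g q => g.modify q.2 [] (fun l => l ++ [q.1])) PySem.Dict.empty)).keys.foldl (fun g idx => g.insert idx (PySem.List.sorted (PySem.Set.ofList (g.getD idx [])) (fun x => x) false)) ((((PySem.List.enumerate urls 0).foldl (fun t2l p => (tg p.2).foldl (fun t2l tag => t2l.insert tag (max (t2l.getD tag (-1)) p.1)) t2l) PySem.Dict.empty).items.foldl (fun g q => g.modify q.2 [] (fun l => l ++ [q.1])) PySem.Dict.empty))).items) = ((((urls.foldl (fun acc u => (tg u).foldl (fun acc tag => if tag ∈ acc then acc else acc ++ [tag]) acc) []).map (fun t => ((match (PySem.List.enumerate urls 0).reverse.find? (fun p => (tg p.2).contains t) with | some p => p.1 | none => -1), t))).foldl (fun g q => if g.contains q.1 then g else g.insert q.1 (PySem.List.sorted (PySem.Set.ofList ((((urls.foldl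 (fun acc u => (tg u).foldl (fun acc tag => if tag ∈ acc then acc else acc ++ [tag]) acc) []).map (fun t => ((match (PySem.List.enumerate urls 0).reverse.find? (fun p => (tg p.2).contains t) with | some p => p.1 | none => -1), t))).filter (fun r => r.1 == q.1)).map (·.2))) (fun x => x) false)) PySem.Dict.empty).items) := by
  have hflat : (PySem.List.enumerate urls 0).flatMap (fun p => tg p.2) = urls.flatMap tg := by
    conv_rhs => rw [← PySem.List.map_snd_enumerate urls 0]
    rw [List.flatMap_map]
  have hkeysA : ((PySem.List.enumerate urls 0).foldl (fun t2l p => (tg p.2).foldl (fun t2l tag => t2l.insert tag (max (t2l.getD tag (-1)) p.1)) t2l) PySem.Dict.empty).keys = (PySem.Set.ofList (urls.flatMap tg)) := by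
    rw [pv_outerKeys, PySem.Dict.keys_empty, PySem.Set.update_nil_left, hflat]
  have hndA : ((PySem.List.enumerate urls 0).foldl (fun t2l p => (tg p.2).foldl (fun t2l tag => t2l.insert tag (max (t2l.getD tag (-1)) p.1)) t2l) PySem.Dict.empty).keys.Nodup := by rw [hkeysA]; exact PySem.Set.nodup_ofList _
  have hitemsA : ((PySem.List.enumerate urls 0).foldl (fun t2l p => (tg p.2).foldl (fun t2l tag => t2l.insert tag (max (t2l.getD tag (-1)) p.1)) t2l) PySem.Dict.empty).items = (PySem.Set.ofList (urls.flatMap tg)).map (fun t => (t, pvL tg (PySem.List.enumerate urls 0) t)) := by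
    rw [PySem.Dict.items_eq_map_keys _ hndA (-1), hkeysA]
    refine List.map_congr_left (fun t _ => ?_)
    rw [pv_outerMax, PySem.Dict.getD_empty]
    rfl
  have htio : (urls.foldl (fun acc u => (tg u).foldl (fun acc tag => if tag ∈ acc then acc else acc ++ [tag]) acc) []) = (PySem.Set.ofList (urls.flatMap tg)) := by
    rw [← List.foldl_flatMap, pv_addFold, PySem.Set.update_nil_left]
  have hLB : ∀ t : String, (match (PySem.List.enumerate urls 0).reverse.find? (fun p => (tg p.2).contains t) with | some p => p.1 | none => -1) = pvL tg (PySem.List.enumerate urls 0) t := by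
    intro t
    rw [pv_findRev]
    · simp only [pvL, List.contains_eq_mem, decide_eq_true_eq]
    · exact PySem.List.pairwise_lt_enumerate urls 0
    · intro p hp
      rcases (PySem.List.mem_enumerate_iff _ _ _).mp hp with ⟨j, hj, rfl⟩
      show (-1 : Int) ≤ 0 + (j : Int)
      omega
  have hpairs : ((PySem.Set.ofList (urls.flatMap tg)).map (fun t => ((match (PySem.List.enumerate urls 0).reverse.find? (fun p => (tg p.2).contains t) with | some p => p.1 | none => -1), t))) = ((PySem.Set.ofList (urls.flatMap tg)).map (fun t => (pvL tg (PySem.List.enumerate urls 0) t, t))) :=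
    List.map_congr_left (fun t _ => by rw [hLB])
  have hgP : (((PySem.Set.ofList (urls.flatMap tg)).map (fun t => (t, pvL tg (PySem.List.enumerate urls 0) t))).foldl (fun g q => g.modify q.2 [] (fun l => l ++ [q.1])) PySem.Dict.empty) = (((PySem.Set.ofList (urls.flatMap tg)).map (fun t => (pvL tg (PySem.List.enumerate urls 0) t, t))).foldl (fun d p => d.modify p.1 [] (fun l => l ++ [p.2])) PySem.Dict.empty) := by
    rw [List.foldl_map, List.foldl_map]
  have hkeysg : (((PySem.Set.ofList (urls.flatMap tg)).map (fun t => (pvL tg (PySem.List.enumerate urls 0) t, t))).foldl (fun d p => d.modify p.1 [] (fun l => l ++ [p.2])) PySem.Dict.empty).keys = PySem.Set.ofList (((PySem.Set.ofList (urls.flatMap tg)).map (fun t => (pvL tg (PySem.List.enumerate urls 0) t, t))).map (·.1)) := by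
    rw [PySem.Dict.keys_foldl_modify_key, PySem.Dict.keys_empty, PySem.Set.update_nil_left]
  have hndg : (((PySem.Set.ofList (urls.flatMap tg)).map (fun t => (pvL tg (PySem.List.enumerate urls 0) t, t))).foldl (fun d p => d.modify p.1 [] (fun l => l ++ [p.2])) PySem.Dict.empty).keys.Nodup := by rw [hkeysg]; exact PySem.Set.nodup_ofList _
  have hgetDg : ∀ k : Int, (((PySem.Set.ofList (urls.flatMap tg)).map (fun t => (pvL tg (PySem.List.enumerate urls 0) t, t))).foldl (fun d p => d.modify p.1 [] (fun l => l ++ [p.2])) PySem.Dict.empty).getD k [] = (((PySem.Set.ofList (urls.flatMap tg)).map (fun t => (pvL tg (PySem.List.enumerate urls 0) t, t))).filter (fun r => r.1 == k)).map (·.2) := by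
    intro k
    rw [PySem.Dict.getD_foldl_modify_append, PySem.Dict.getD_empty, List.nil_append]
  have hkeysF : ((((PySem.Set.ofList (urls.flatMap tg)).map (fun t => (pvL tg (PySem.List.enumerate urls 0) t, t))).foldl (fun d p => d.modify p.1 [] (fun l => l ++ [p.2])) PySem.Dict.empty).keys.foldl (fun g idx => g.insert idx (PySem.List.sorted (PySem.Set.ofList (g.getD idx [])) (fun x => x) false)) (((PySem.Set.ofList (urls.flatMap tg)).map (fun t => (pvL tg (PySem.List.enumerate urls 0) t, t))).foldl (fun d p => d.modify p.1 [] (fun l => l ++ [p.2])) PySem.Dict.empty)).keys = (((PySem.Set.ofList (urls.flatMap tg)).map (fun t => (pvL tg (PySem.List.enumerate urls 0) t, t))).foldl (fun d p => d.modify p.1 [] (fun l => l ++ [p.2])) PySem.Dict.empty).keys := by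
    rw [PySem.Dict.keys_foldl_insert, pv_update_of_subset _ _ (fun x hx => hx)]
  have hndF : ((((PySem.Set.ofList (urls.flatMap tg)).map (fun t => (pvL tg (PySem.List.enumerate urls 0) t, t))).foldl (fun d p => d.modify p.1 [] (fun l => l ++ [p.2])) PySem.Dict.empty).keys.foldl (fun g idx => g.insert idx (PySem.List.sorted (PySem.Set.ofList (g.getD idx [])) (fun x => x) false)) (((PySem.Set.ofList (urls.flatMap tg)).map (fun t => (pvL tg (PySem.List.enumerate urls 0) t, t))).foldl (fun d p => d.modify p.1 [] (fun l => l ++ [p.2])) PySem.Dict.empty)).keys.Nodup := by rw [hkeysF]; exact hndg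
  have hAside : ((((PySem.Set.ofList (urls.flatMap tg)).map (fun t => (pvL tg (PySem.List.enumerate urls 0) t, t))).foldl (fun d p => d.modify p.1 [] (fun l => l ++ [p.2])) PySem.Dict.empty).keys.foldl (fun g idx => g.insert idx (PySem.List.sorted (PySem.Set.ofList (g.getD idx [])) (fun x => x) false)) (((PySem.Set.ofList (urls.flatMap tg)).map (fun t => (pvL tg (PySem.List.enumerate urls 0) t, t))).foldl (fun d p => d.modify p.1 [] (fun l => l ++ [p.2])) PySem.Dict.empty)).items = ((PySem.Set.ofList (((PySem.Set.ofList (urls.flatMap tg)).map (fun t => (pvL tg (PySem.List.enumerate urls 0) t, t))).map (·.1))).map (fun k => (k, (PySem.List.sorted (PySem.Set.ofList ((((PySem.Set.ofList (urls.flatMap tg)).map (fun t => (pvL tg (PySem.List.enumerate urls 0) t, t))).filter (fun r => r.1 == k)).map (·.2))) (fun x => x) false)))) := by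
    rw [PySem.Dict.items_eq_map_keys _ hndF [], hkeysF, ← hkeysg]
    refine List.map_congr_left (fun k hk => ?_)
    rw [pv_sortLoopGetD _ _ hndg k, if_pos hk, hgetDg]
  have hkeysB : (((PySem.Set.ofList (urls.flatMap tg)).map (fun t => (pvL tg (PySem.List.enumerate urls 0) t, t))).foldl (fun g q => if g.contains q.1 then g else g.insert q.1 (PySem.List.sorted (PySem.Set.ofList ((((PySem.Set.ofList (urls.flatMap tg)).map (fun t => (pvL tg (PySem.List.enumerate urls 0) t, t))).filter (fun r => r.1 == q.1)).map (·.2))) (fun x => x) false)) PySem.Dict.empty).keys = PySem.Set.ofList (((PySem.Set.ofList (urls.flatMap tg)).map (fun t => (pvL tg (PySem.List.enumerate urls 0) t, t))).map (·.1)) := by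
    rw [pv_groupKeys ((PySem.Set.ofList (urls.flatMap tg)).map (fun t => (pvL tg (PySem.List.enumerate urls 0) t, t))) ((PySem.Set.ofList (urls.flatMap tg)).map (fun t => (pvL tg (PySem.List.enumerate urls 0) t, t))) PySem.Dict.empty, PySem.Dict.keys_empty, PySem.Set.update_nil_left]
  have hndB : (((PySem.Set.ofList (urls.flatMap tg)).map (fun t => (pvL tg (PySem.List.enumerate urls 0) t, t))).foldl (fun g q => if g.contains q.1 then g else g.insert q.1 (PySem.List.sorted (PySem.Set.ofList ((((PySem.Set.ofList (urls.flatMap tg)).map (fun t => (pvL tg (PySem.List.enumerate urls 0) t, t))).filter (fun r => r.1 == q.1)).map (·.2))) (fun x => x) false)) PySem.Dict.empty).keys.Nodup := by rw [hkeysB]; exact PySem.Set.nodup_ofList _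
  have hBside : (((PySem.Set.ofList (urls.flatMap tg)).map (fun t => (pvL tg (PySem.List.enumerate urls 0) t, t))).foldl (fun g q => if g.contains q.1 then g else g.insert q.1 (PySem.List.sorted (PySem.Set.ofList ((((PySem.Set.ofList (urls.flatMap tg)).map (fun t => (pvL tg (PySem.List.enumerate urls 0) t, t))).filter (fun r => r.1 == q.1)).map (·.2))) (fun x => x) false)) PySem.Dict.empty).items = ((PySem.Set.ofList (((PySem.Set.ofList (urls.flatMap tg)).map (fun t => (pvL tg (PySem.List.enumerate urls 0) t, t))).map (·.1))).map (fun k => (k, (PySem.List.sorted (PySem.Set.ofList ((((PySem.Set.ofList (urls.flatMap tg)).map (fun t => (pvL tg (PySem.List.enumerate urls 0) t, t))).filter (fun r => r.1 == k)).map (·.2))) (fun x => x) false)))) := by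
    rw [PySem.Dict.items_eq_map_keys _ hndB [], hkeysB]
    refine List.map_congr_left (fun k hk => ?_)
    have hkP : k ∈ ((PySem.Set.ofList (urls.flatMap tg)).map (fun t => (pvL tg (PySem.List.enumerate urls 0) t, t))).map (·.1) := by rwa [PySem.Set.mem_ofList] at hk
    rw [pv_groupGetD ((PySem.Set.ofList (urls.flatMap tg)).map (fun t => (pvL tg (PySem.List.enumerate urls 0) t, t))) ((PySem.Set.ofList (urls.flatMap tg)).map (fun t => (pvL tg (PySem.List.enumerate urls 0) t, t))) PySem.Dict.empty k]
    simp only [PySem.Dict.contains_empty, Bool.false_eq_true, if_false, hkP, if_true]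
  rw [hitemsA, hgP, htio, hpairs, hAside, hBside]

-- ===== VERDICT (by name: the statement is the Claim_ definition above) =====
theorem tags_finalized_at_url_index_py_spec : Claim_equal_tags_finalized_at_url_index_py := by
  intro urls atp _
  unfold Spec_tags_finalized_at_url_index_py
  unfold tags_finalized_at_url_index_py tags_finalized_at_url_index_py_alt
  exact pv_main urls (fun u => (PySem.Dict.ofList atp).getD u [])
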